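-- pv_equiv track=rewrite | github.com/sleeepeer/PIArena | piarena/utils.py | contexts_to_segments
-- ===== SOURCE A (Python) =====
-- def contexts_to_segments(contexts):
--     segment_size = 100
--     context = contexts[0]
--     words = context.split(' ')
--
--     # Create a list to hold segments
--     segments = []
--
--     # Iterate over the words and group them into segments
--     for i in range(0, len(words), segment_size):
--         # Join a segment of 100 words and add to segments list
--         segment = ' '.join(words[i:i + segment_size])+' '
--         segments.append(segment)
--
--     return segments
-- ===== SOURCE B (Python) =====
-- def contexts_to_segments(contexts):
--     segments = []
--     current = []
--     count = 0
--     for w in contexts[0].split(' '):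
--         current.append(w)
--         count += 1
--         if count == 100:
--             segments.append(' '.join(current) + ' ')
--             current = []
--             count = 0
--     if current:
--         segments.append(' '.join(current) + ' ')
--     return segments
-- ===== Notes on version B (the rewrite author's own statement) =====
-- stated objective: alternative
-- what changed: Replaces index-based slicing over range(0, len(words), 100) with a single streaming pass that accumulates words into a buffer and flushes it every 100 words (and once at the end if non-empty).
import Mathlib
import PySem

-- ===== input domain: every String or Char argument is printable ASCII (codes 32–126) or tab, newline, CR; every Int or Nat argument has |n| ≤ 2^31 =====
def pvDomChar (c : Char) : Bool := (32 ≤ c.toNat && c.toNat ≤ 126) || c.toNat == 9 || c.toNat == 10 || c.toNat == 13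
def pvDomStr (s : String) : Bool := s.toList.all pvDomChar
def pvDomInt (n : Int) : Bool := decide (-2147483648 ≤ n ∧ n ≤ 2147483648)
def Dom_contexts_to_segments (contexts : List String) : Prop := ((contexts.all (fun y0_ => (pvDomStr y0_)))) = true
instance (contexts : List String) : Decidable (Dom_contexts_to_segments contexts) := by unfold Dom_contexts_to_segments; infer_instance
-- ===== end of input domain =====

-- B replaces A's index-slice chunking over range(0, len(words), 100) by one streaming pass
-- with a word buffer flushed every 100 words (alternative decomposition, same cost).

-- ===== PORT A =====
def contexts_to_segments (contexts : List String) : List String :=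
  match PySem.List.pyGet? contexts 0 with
  | none => []            -- contexts[0] raises IndexError; excluded by Pre_
  | some context =>
    match PySem.Str.split? context " " with
    | none => []          -- unreachable: the separator " " is non-empty
    | some words =>
      (PySem.List.pyRange 0 (words.length : Int) 100).foldl
        (fun segments i =>
          segments ++ [PySem.Str.join " " (PySem.List.slice words (some i) (some (i + 100))) ++ " "])
        []

-- ===== PORT B =====
def contexts_to_segments_alt (contexts : List String) : List String :=
  match PySem.List.pyGet? contexts 0 with
  | none => []            -- contexts[0] raises IndexError; excluded by Pre_
  | some context =>
    match PySem.Str.split? context " " with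
    | none => []          -- unreachable: the separator " " is non-empty
    | some words =>
      let st := words.foldl
        (fun (st : List String × List String × Int) w =>
          let current := st.2.1 ++ [w]
          let count := st.2.2 + 1
          if count == 100 then (st.1 ++ [PySem.Str.join " " current ++ " "], ([], 0))
          else (st.1, (current, count)))
        ([], ([], 0))
      if st.2.1.isEmpty then st.1 else st.1 ++ [PySem.Str.join " " st.2.1 ++ " "]

-- ===== PRECONDITION & SPEC =====
-- Pre_ excludes only the empty list, on which Python's contexts[0] raises IndexError.
def Pre_contexts_to_segments (contexts : List String) : Prop := contexts ≠ []
instance (contexts : List String) : Decidable (Pre_contexts_to_segments contexts) := by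
  unfold Pre_contexts_to_segments; infer_instance
def pvWitness_contexts_to_segments : List String := ["a b"]
def Spec_contexts_to_segments (contexts : List String) (out : List String) : Prop :=
  out = contexts_to_segments_alt contexts
instance (contexts : List String) (out : List String) : Decidable (Spec_contexts_to_segments contexts out) := by
  unfold Spec_contexts_to_segments; infer_instance

-- ===== CLAIM (what is proved, stated in full; the proofs are below) =====
def Claim_equal_contexts_to_segments : Prop :=
  ∀ (contexts : List String), Dom_contexts_to_segments contexts →
    Pre_contexts_to_segments contexts →
    Spec_contexts_to_segments contexts (contexts_to_segments contexts)

-- ===== LEMMAS AND PROOFS =====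

-- Common specification: the list of joined 100-word chunks of ws, in order.
def pvSeg (J : List String → String) (ws : List String) : List String :=
  if ws.isEmpty then []
  else J (ws.take 100) :: pvSeg J (ws.drop 100)
termination_by ws.length
decreasing_by
  simp only [List.length_drop]
  rcases ws with _ | ⟨a, t⟩
  · simp_all
  · simp only [List.length_cons]; omega

theorem pvSeg_nil (J : List String → String) : pvSeg J [] = [] := by
  rw [pvSeg]; rfl

theorem pvSeg_cons (J : List String → String) (ws : List String) (h : ws ≠ []) :
    pvSeg J ws = J (ws.take 100) :: pvSeg J (ws.drop 100) := by
  rw [pvSeg]; simp [h]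

-- shifting a slice by one chunk
theorem pvSliceShift (ws : List String) (k : Nat) :
    PySem.List.slice ws (some (0 + 100 * ((k : Int) + 1))) (some (0 + 100 * ((k : Int) + 1) + 100))
      = PySem.List.slice (ws.drop 100) (some (0 + 100 * (k : Int))) (some (0 + 100 * (k : Int) + 100)) := by
  rw [PySem.List.slice_toNat _ (by omega) (by omega), PySem.List.slice_toNat _ (by omega) (by omega)]
  have e1 : (0 + 100 * ((k : Int) + 1)).toNat = 100 * k + 100 := by omega
  have e2 : (0 + 100 * ((k : Int) + 1) + 100).toNat = 100 * k + 200 := by omega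
  have e3 : (0 + 100 * (k : Int)).toNat = 100 * k := by omega
  have e4 : (0 + 100 * (k : Int) + 100).toNat = 100 * k + 100 := by omega
  rw [e1, e2, e3, e4, List.drop_drop]
  have t1 : 100 * k + 200 - (100 * k + 100) = 100 := by omega
  have t2 : 100 * k + 100 - 100 * k = 100 := by omega
  have t3 : 100 * k + 100 = 100 + 100 * k := by omega
  rw [t1, t2, t3]

-- A's fold over the chunk-start indices computes pvSeg.
theorem pvLAmap (J : List String → String) :
    ∀ (N : Nat) (ws acc : List String), N = (ws.length + 99) / 100 →
      (List.range N).foldl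
        (fun s (k : Nat) => s ++ [J (PySem.List.slice ws (some (0 + 100 * (k : Int))) (some (0 + 100 * (k : Int) + 100)))]) acc
      = acc ++ pvSeg J ws := by
  intro N
  induction N with
  | zero =>
    intro ws acc h
    have h0 : ws.length = 0 := by omega
    have hw : ws = [] := List.length_eq_zero_iff.mp h0
    subst hw
    simp [pvSeg_nil]
  | succ N ih =>
    intro ws acc h
    have hlen : 0 < ws.length := by omega
    have hne : ws ≠ [] := by
      intro e; subst e; simp at hlen
    rw [List.range_succ_eq_map, List.foldl_cons, List.foldl_map]
    simp only [Nat.succ_eq_add_one, Nat.cast_add, Nat.cast_one, Nat.cast_zero]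
    have h0 : PySem.List.slice ws (some (0 + 100 * (0 : Int))) (some (0 + 100 * (0 : Int) + 100))
        = ws.take 100 := by
      rw [PySem.List.slice_toNat ws (by omega) (by omega)]
      have e1 : (0 + 100 * (0 : Int)).toNat = 0 := by omega
      have e2 : (0 + 100 * (0 : Int) + 100).toNat = 100 := by omega
      rw [e1, e2, List.drop_zero]
    rw [h0]
    simp only [pvSliceShift]
    rw [ih (ws.drop 100) (acc ++ [J (ws.take 100)]) (by rw [List.length_drop]; omega)]
    rw [pvSeg_cons J ws hne]
    simp

theorem pvLA (J : List String → String) (ws acc : List String) :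
    (PySem.List.pyRange 0 (ws.length : Int) 100).foldl
      (fun s i => s ++ [J (PySem.List.slice ws (some i) (some (i + 100)))]) acc
    = acc ++ pvSeg J ws := by
  rw [PySem.List.pyRange_of_pos 0 (ws.length : Int) (by norm_num)]
  rw [List.foldl_map]
  by_cases hl : (0 : Int) < (ws.length : Int)
  · rw [if_pos hl]
    exact pvLAmap J (((ws.length : Int) - 0 + 100 - 1) / 100).toNat ws acc (by omega)
  · rw [if_neg hl]
    have h0 : ws.length = 0 := by omega
    have hw : ws = [] := List.length_eq_zero_iff.mp h0
    subst hw
    simp [pvSeg_nil]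

-- B's final flush (proof-side name for B's trailing if)
def pvFlush (J : List String → String) (st : List String × List String × Int) : List String :=
  if st.2.1.isEmpty then st.1 else st.1 ++ [J st.2.1]

-- B's streaming fold computes pvSeg of buffer ++ remaining words.
theorem pvLB (J : List String → String) :
    ∀ (ws segs cur : List String) (count : Int), cur.length < 100 → count = (cur.length : Int) →
      pvFlush J (ws.foldl
        (fun (st : List String × List String × Int) w =>
          if st.2.2 + 1 == 100 then (st.1 ++ [J (st.2.1 ++ [w])], ([], 0))
          else (st.1, (st.2.1 ++ [w], st.2.2 + 1)))
        (segs, (cur, count)))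
      = segs ++ pvSeg J (cur ++ ws) := by
  intro ws
  induction ws with
  | nil =>
    intro segs cur count h hcount
    subst hcount
    rcases eq_or_ne cur [] with hc | hc
    · subst hc; simp [pvFlush, pvSeg_nil]
    · have ht : cur.take 100 = cur := List.take_of_length_le (by omega)
      have hd : cur.drop 100 = [] := List.drop_eq_nil_of_le (by omega)
      simp [pvFlush, pvSeg_cons J cur hc, ht, hd, pvSeg_nil, hc, List.isEmpty_iff]
  | cons w rest ih =>
    intro segs cur count h hcount
    subst hcount
    simp only [List.foldl_cons]
    by_cases hc : cur.length + 1 = 100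
    · have hb : (((cur.length : Int) + 1) == 100) = true := by
        simp [beq_iff_eq]; omega
      simp only [hb, if_true]
      rw [ih (segs ++ [J (cur ++ [w])]) [] 0 (by norm_num) (by simp)]
      have hlen : (cur ++ [w]).length = 100 := by simp; omega
      have hsplit : cur ++ w :: rest = (cur ++ [w]) ++ rest := by simp
      rw [hsplit, pvSeg_cons J (cur ++ [w] ++ rest) (by cases cur <;> simp)]
      rw [List.take_left' hlen, List.drop_left' hlen]
      simp
    · have hb : (((cur.length : Int) + 1) == 100) = false := by
        simp; omega
      have hcast : (cur.length : Int) + 1 = ((cur ++ [w]).length : Int) := by simp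
      simp only [hb, Bool.false_eq_true, if_false]
      rw [ih segs (cur ++ [w]) ((cur.length : Int) + 1) (by simp; omega) hcast]
      simp

-- ===== VERDICT (by name: the statement is the Claim_ definition above) =====
theorem contexts_to_segments_spec : Claim_equal_contexts_to_segments := by
  intro contexts _ _
  show contexts_to_segments contexts = contexts_to_segments_alt contexts
  cases hg : PySem.List.pyGet? contexts 0 with
  | none => simp only [contexts_to_segments, contexts_to_segments_alt, hg]
  | some context =>
    cases hs : PySem.Str.split? context " " with
    | none => simp only [contexts_to_segments, contexts_to_segments_alt, hg, hs]
    | some words =>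
      simp only [contexts_to_segments, contexts_to_segments_alt, hg, hs]
      exact (pvLA (fun c => PySem.Str.join " " c ++ " ") words []).trans
        ((pvLB (fun c => PySem.Str.join " " c ++ " ") words [] [] 0 (by norm_num) (by simp)).symm)
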